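-- pv_equiv track=rewrite | github.com/neo622/Algorithm-Study | 문제 풀이/[백준] 예산.py | solution
-- ===== SOURCE A (Python) =====
-- def bud_cal(num, arr):
--     bud = 0
--     for i in arr:
--         bud += min(i, num)
--     return bud
--
-- def solution(budget, arr):
--     answer = []
--     low = 0
--     high = max(arr)
--     while low < high:
--         mid = (low + high) // 2
--         if bud_cal(mid, arr) <= budget:
--             answer.append(mid)
--             low = mid+1
--         if bud_cal(mid, arr) > budget:
--             high = mid-1
--     return max(answer)
-- ===== SOURCE B (Python) =====
-- def _bisect_right(s, x):
--     lo, hi = 0, len(s)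
--     while lo < hi:
--         m = (lo + hi) // 2
--         if s[m] <= x:
--             lo = m + 1
--         else:
--             hi = m
--     return lo
--
-- def solution(budget, arr):
--     s = sorted(arr)
--     n = len(s)
--     prefix = [0]
--     for v in s:
--         prefix.append(prefix[-1] + v)
--     best = None
--     low = 0
--     high = max(arr)
--     while low < high:
--         mid = (low + high) // 2
--         k = _bisect_right(s, mid)
--         if prefix[k] + mid * (n - k) <= budget:
--             best = mid
--             low = mid + 1
--         else:
--             high = mid - 1
--     return best
-- ===== Notes on version B (the rewrite author's own statement) =====
-- stated objective: faster
-- what changed: The O(n) cost scan bud_cal run at every binary-search probe is replaced by a one-time sort with prefix sums plus an O(log n) bisection for the split point, and the answer list is replaced by a best-so-far variable; the outer binary search on the cap is kept so the returned value is identical.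
import Mathlib
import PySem

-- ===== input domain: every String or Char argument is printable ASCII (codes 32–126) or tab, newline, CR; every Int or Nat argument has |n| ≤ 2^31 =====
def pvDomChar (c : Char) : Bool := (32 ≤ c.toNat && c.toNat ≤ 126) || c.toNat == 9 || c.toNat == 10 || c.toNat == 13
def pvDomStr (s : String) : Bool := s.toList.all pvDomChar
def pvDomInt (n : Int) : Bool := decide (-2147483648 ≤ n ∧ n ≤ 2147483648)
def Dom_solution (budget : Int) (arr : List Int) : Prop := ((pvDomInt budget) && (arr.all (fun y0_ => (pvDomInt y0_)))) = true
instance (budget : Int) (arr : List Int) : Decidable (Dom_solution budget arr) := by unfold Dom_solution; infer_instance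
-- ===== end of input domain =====

-- B replaces A's O(n) per-probe cost scan by a one-time sort with prefix sums and an O(log n)
-- binary search for the split point, keeping A's outer binary search on the cap (objective: faster).


-- ===== PORT A =====
-- bud_cal(num, arr): bud = 0; for i in arr: bud += min(i, num)
def budCal (num : Int) (arr : List Int) : Int :=
  arr.foldl (fun bud i => bud + min i num) 0

-- the while-loop of A; answer/low/high are the loop state, two sequential ifs as in the source
def loopA (budget : Int) (arr : List Int) (answer : List Int) (low high : Int) : List Int :=
  if h : low < high then
    let mid := PySem.Int.floordiv (low + high) 2
    let answer' := if budCal mid arr ≤ budget then answer ++ [mid] else answer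
    let low' := if budCal mid arr ≤ budget then mid + 1 else low
    let high' := if budCal mid arr > budget then mid - 1 else high
    loopA budget arr answer' low' high'
  else answer
termination_by (high - low).toNat
decreasing_by
  have hb := PySem.Int.floordiv_two_mid_bounds (lo := low) (hi := high) (le_of_lt h)
  by_cases hc : budCal (PySem.Int.floordiv (low + high) 2) arr ≤ budget
  · rw [dif_pos hc, dif_neg (not_lt.mpr hc)]; omega
  · rw [dif_neg hc, dif_pos (lt_of_not_ge hc)]; omega

-- max(arr) and max(answer) raise ValueError on an empty list; Pre_solution excludes those inputs
def solution (budget : Int) (arr : List Int) : Int :=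
  let high := (PySem.List.max? arr id).getD 0
  (PySem.List.max? (loopA budget arr [] 0 high) id).getD 0

-- ===== PORT B =====
-- _bisect_right(s, x): hand-written bisection; s[m] is always in range here (0 ≤ lo ≤ m < hi ≤ len(s)),
-- so pyGetD with default 0 is exact
def bisectR (s : List Int) (x : Int) (lo hi : Int) : Int :=
  if h : lo < hi then
    let m := PySem.Int.floordiv (lo + hi) 2
    if PySem.List.pyGetD s m 0 ≤ x then bisectR s x (m + 1) hi
    else bisectR s x lo m
  else lo
termination_by (hi - lo).toNat
decreasing_by
  all_goals
    have hb := PySem.Int.floordiv_two_mid_bounds (lo := lo) (hi := hi) (le_of_lt h)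
    have hm : PySem.Int.floordiv (lo + hi) 2 < hi := by
      rw [PySem.Int.floordiv_lt_iff_lt_mul (by norm_num)]; omega
    omega

-- prefix = [0]; for v in s: prefix.append(prefix[-1] + v)
def prefixSums (s : List Int) : List Int :=
  s.foldl (fun p v => p ++ [(p.getLast?.getD 0) + v]) [0]

-- B's while-loop: same cap search, cost via prefix sums + bisection, best-so-far instead of a list
def loopB (budget : Int) (s prefixL : List Int) (n : Int) (best : Option Int) (low high : Int) :
    Option Int :=
  if h : low < high then
    let mid := PySem.Int.floordiv (low + high) 2
    let k := bisectR s mid 0 n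
    if PySem.List.pyGetD prefixL k 0 + mid * (n - k) ≤ budget then
      loopB budget s prefixL n (some mid) (mid + 1) high
    else
      loopB budget s prefixL n best low (mid - 1)
  else best
termination_by (high - low).toNat
decreasing_by
  all_goals
    have hb := PySem.Int.floordiv_two_mid_bounds (lo := low) (hi := high) (le_of_lt h)
    omega

def solution_alt (budget : Int) (arr : List Int) : Int :=
  let s := PySem.List.sorted arr id
  let n : Int := s.length
  let prefixL := prefixSums s
  (loopB budget s prefixL n none 0 ((PySem.List.max? arr id).getD 0)).getD 0

-- ===== PRECONDITION & SPEC =====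
-- Pre_ excludes exactly the inputs on which A raises ValueError (max() of an empty list): arr = [],
-- max(arr) < 1 (the loop never runs), and the inputs where no midpoint A's search ever probes is
-- affordable — the smallest probed midpoint is 0 when the top two bits of max(arr)+2 are '11'
-- (the halving descent reaches high = 1) and 1 otherwise.
def Pre_solution (budget : Int) (arr : List Int) : Prop :=
  arr ≠ [] ∧
    (let M := (PySem.List.max? arr id).getD 0
     1 ≤ M ∧
       (arr.map (fun i =>
           min i (if (3 * 2 ^ (PySem.Int.bitLength (M + 2) - 2) : Int) ≤ M + 2 then 0 else 1))).sum
         ≤ budget)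
instance (budget : Int) (arr : List Int) : Decidable (Pre_solution budget arr) := by
  unfold Pre_solution; infer_instance

def pvWitness_solution : Int × List Int := (10, [3, 3])

def Spec_solution (budget : Int) (arr : List Int) (out : Int) : Prop := out = solution_alt budget arr
instance (budget : Int) (arr : List Int) (out : Int) : Decidable (Spec_solution budget arr out) := by
  unfold Spec_solution; infer_instance

-- ===== CLAIM (what is proved, stated in full; the proofs are below) =====
def Claim_equal_solution : Prop := ∀ (budget : Int) (arr : List Int), Dom_solution budget arr → Pre_solution budget arr → Spec_solution budget arr (solution budget arr)

-- ===== LEMMAS AND PROOFS =====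
theorem budCal_sum (num : Int) (arr : List Int) :
    budCal num arr = (arr.map (fun i => min i num)).sum := by
  unfold budCal
  rw [PySem.List.foldl_add arr (fun i => min i num) 0, zero_add]

theorem max?_append_lt (xs : List Int) (z : Int) (h : ∀ x ∈ xs, x < z) :
    PySem.List.max? (xs ++ [z]) id = some z := by
  cases hmx : PySem.List.max? xs id with
  | none =>
    unfold PySem.List.max? at hmx ⊢
    rw [List.foldl_append, hmx]
    simp
  | some b =>
    have hb := h b (PySem.List.max?_mem hmx)
    unfold PySem.List.max? at hmx ⊢
    rw [List.foldl_append, hmx]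
    simp [hb]

theorem prefix_foldl_scanl (sl : List Int) (acc : List Int) (t : Int)
    (hacc : acc.getLast? = some t) :
    sl.foldl (fun p v => p ++ [(p.getLast?.getD 0) + v]) acc =
      acc.dropLast ++ List.scanl (· + ·) t sl := by
  induction sl generalizing acc t with
  | nil =>
    simp only [List.foldl_nil, List.scanl_nil]
    exact (List.dropLast_append_getLast? t hacc).symm
  | cons v vs ih =>
    simp only [List.foldl_cons, hacc, Option.getD_some, List.scanl_cons]
    rw [ih (acc ++ [t + v]) (t + v) (by simp), List.dropLast_concat]
    conv_lhs => rw [← List.dropLast_append_getLast? t hacc]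
    simp

theorem prefixSums_eq_scanl (sl : List Int) :
    prefixSums sl = List.scanl (· + ·) 0 sl := by
  unfold prefixSums
  rw [prefix_foldl_scanl sl [0] 0 rfl]
  simp

theorem pyGetD_scanl (sl : List Int) (t : Int) (k : Nat) (hk : k ≤ sl.length) :
    PySem.List.pyGetD (List.scanl (· + ·) t sl) (k : Int) 0 = t + (sl.take k).sum := by
  rw [PySem.List.pyGetD_of_nonneg _ _ (by positivity)]
  simp only [Int.toNat_natCast]
  induction sl generalizing t k with
  | nil =>
    simp only [List.length_nil, Nat.le_zero] at hk
    subst hk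
    simp
  | cons v vs ih =>
    cases k with
    | zero => simp
    | succ k' =>
      simp only [List.scanl_cons, List.getD_cons_succ, List.take_succ_cons, List.sum_cons]
      rw [ih (t + v) k' (by simpa using hk)]
      ring

theorem bisect_spec (s : List Int) (x : Int) (hs : List.Pairwise (· ≤ ·) s) :
    ∀ (d : Nat) (lo hi : Int), (hi - lo).toNat = d → 0 ≤ lo → lo ≤ hi → hi ≤ (s.length : Int) →
    (∀ j : Nat, j < s.length → (j : Int) < lo → s.getD j 0 ≤ x) →
    (∀ j : Nat, j < s.length → hi ≤ (j : Int) → x < s.getD j 0) →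
    ∃ k : Nat, bisectR s x lo hi = (k : Int) ∧ lo ≤ (k : Int) ∧ (k : Int) ≤ hi ∧
      (∀ j : Nat, j < s.length → j < k → s.getD j 0 ≤ x) ∧
      (∀ j : Nat, j < s.length → k ≤ j → x < s.getD j 0) := by
  intro d
  induction d using Nat.strong_induction_on with
  | _ d ih =>
    intro lo hi hd h0 hlh hlen hlow hhigh
    rw [bisectR]
    by_cases hlt : lo < hi
    · rw [dif_pos hlt]
      have hb := PySem.Int.floordiv_two_mid_bounds (lo := lo) (hi := hi) (le_of_lt hlt)
      have hm : PySem.Int.floordiv (lo + hi) 2 < hi := by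
        rw [PySem.Int.floordiv_lt_iff_lt_mul (by norm_num)]; omega
      set m := PySem.Int.floordiv (lo + hi) 2 with hmdef
      have hmn : m = ((m.toNat : Nat) : Int) := by omega
      have hmlen : m.toNat < s.length := by omega
      have hget : PySem.List.pyGetD s m 0 = s.getD m.toNat 0 :=
        PySem.List.pyGetD_of_nonneg s 0 (by omega)
      have hsort : ∀ i j : Nat, i < j → j < s.length → s.getD i 0 ≤ s.getD j 0 := by
        intro i j hij hj
        rw [List.getD_eq_getElem s 0 (by omega), List.getD_eq_getElem s 0 hj]
        exact List.pairwise_iff_getElem.mp hs i j (by omega) hj hij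
      by_cases hcmp : PySem.List.pyGetD s m 0 ≤ x
      · rw [if_pos hcmp]
        have hlow' : ∀ j : Nat, j < s.length → (j : Int) < m + 1 → s.getD j 0 ≤ x := by
          intro j hj hjm
          rcases Nat.lt_or_ge j m.toNat with hc | hc
          · exact le_trans (hsort j m.toNat hc hmlen) (hget ▸ hcmp)
          · have : j = m.toNat := by omega
            subst this
            exact hget ▸ hcmp
        obtain ⟨k, e1, e2, e3, e4, e5⟩ :=
          ih (hi - (m + 1)).toNat (by omega) (m + 1) hi rfl (by omega) (by omega) hlen
            hlow' hhigh
        exact ⟨k, e1, by omega, e3, e4, e5⟩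
      · rw [if_neg hcmp]
        rw [hget] at hcmp
        rw [not_le] at hcmp
        have hhigh' : ∀ j : Nat, j < s.length → m ≤ (j : Int) → x < s.getD j 0 := by
          intro j hj hjm
          rcases Nat.lt_or_ge m.toNat j with hc | hc
          · exact lt_of_lt_of_le hcmp (hsort m.toNat j hc hj)
          · have : j = m.toNat := by omega
            subst this
            exact hcmp
        obtain ⟨k, e1, e2, e3, e4, e5⟩ :=
          ih (m - lo).toNat (by omega) lo m rfl h0 (by omega) (by omega) hlow hhigh'
        exact ⟨k, e1, e2, by omega, e4, e5⟩
    · rw [dif_neg hlt]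
      refine ⟨lo.toNat, by omega, by omega, by omega, ?_, ?_⟩
      · intro j hj hjk
        exact hlow j hj (by omega)
      · intro j hj hjk
        exact hhigh j hj (by omega)

theorem sum_min_split (s : List Int) (x : Int) : ∀ (k : Nat), k ≤ s.length →
    (∀ j : Nat, j < s.length → j < k → s.getD j 0 ≤ x) →
    (∀ j : Nat, j < s.length → k ≤ j → x < s.getD j 0) →
    (s.map (fun i => min i x)).sum = (s.take k).sum + x * ((s.length : Int) - k) := by
  induction s with
  | nil => intro k hk _ _; simp_all
  | cons v vs ih =>
    intro k hk h1 h2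
    cases k with
    | zero =>
      have hv : min v x = x := min_eq_right (le_of_lt (h2 0 (by simp) (by omega)))
      simp only [List.map_cons, List.sum_cons, hv, List.take_zero, List.sum_nil]
      rw [ih 0 (by omega) (by omega)
        (fun j hj _ => by simpa using h2 (j + 1) (by simpa using hj) (by omega))]
      simp only [List.take_zero, List.sum_nil, List.length_cons]
      push_cast
      ring
    | succ k' =>
      have hv : min v x = v := min_eq_left (by simpa using h1 0 (by simp) (by omega))
      simp only [List.map_cons, List.sum_cons, hv, List.take_succ_cons]
      rw [ih k' (by simpa using hk)
        (fun j hj hjk => by simpa using h1 (j + 1) (by simpa using hj) (by omega))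
        (fun j hj hjk => by simpa using h2 (j + 1) (by simpa using hj) (by omega))]
      simp only [List.length_cons]
      push_cast
      ring

theorem cost_eq (arr : List Int) (mid : Int) :
    budCal mid arr =
      PySem.List.pyGetD (prefixSums (PySem.List.sorted arr id))
          (bisectR (PySem.List.sorted arr id) mid 0 ((PySem.List.sorted arr id).length : Int)) 0 +
        mid * (((PySem.List.sorted arr id).length : Int) -
          bisectR (PySem.List.sorted arr id) mid 0 ((PySem.List.sorted arr id).length : Int)) := by
  set s := PySem.List.sorted arr id with hsdef
  have hs : List.Pairwise (· ≤ ·) s := by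
    have := PySem.List.sorted_pairwise arr id
    simpa using this
  obtain ⟨k, hkeq, hk0, hk1, hlow, hhigh⟩ :=
    bisect_spec s mid hs ((s.length : Int) - 0).toNat 0 (s.length : Int) rfl (by omega)
      (by positivity) (le_refl _) (fun j hj hneg => by omega) (fun j hj hge => by omega)
  rw [hkeq, prefixSums_eq_scanl, pyGetD_scanl s 0 k (by omega), zero_add]
  have hperm : (s.map (fun i => min i mid)).Perm (arr.map (fun i => min i mid)) :=
    (PySem.List.sorted_perm arr id false).map _
  rw [budCal_sum, ← hperm.sum_eq]
  exact sum_min_split s mid k (by omega) hlow hhigh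

theorem loops_eq (budget : Int) (arr : List Int) :
    ∀ (d : Nat) (low high : Int) (answer : List Int) (best : Option Int),
      (high - low).toNat = d →
      PySem.List.max? answer id = best →
      (∀ a ∈ answer, a < low) →
      PySem.List.max? (loopA budget arr answer low high) id =
        loopB budget (PySem.List.sorted arr id) (prefixSums (PySem.List.sorted arr id))
          ((PySem.List.sorted arr id).length : Int) best low high := by
  intro d
  induction d using Nat.strong_induction_on with
  | _ d ih =>
    intro low high answer best hd hbest hinv
    rw [loopA, loopB]
    by_cases hlt : low < high
    · rw [dif_pos hlt, dif_pos hlt]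
      have hb := PySem.Int.floordiv_two_mid_bounds (lo := low) (hi := high) (le_of_lt hlt)
      set mid := PySem.Int.floordiv (low + high) 2 with hmdef
      have hc := cost_eq arr mid
      show PySem.List.max?
          (loopA budget arr (if budCal mid arr ≤ budget then answer ++ [mid] else answer)
            (if budCal mid arr ≤ budget then mid + 1 else low)
            (if budCal mid arr > budget then mid - 1 else high)) id =
        (if PySem.List.pyGetD (prefixSums (PySem.List.sorted arr id))
              (bisectR (PySem.List.sorted arr id) mid 0 ((PySem.List.sorted arr id).length : Int)) 0 +
              mid * (((PySem.List.sorted arr id).length : Int) -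
                bisectR (PySem.List.sorted arr id) mid 0 ((PySem.List.sorted arr id).length : Int))
              ≤ budget then
          loopB budget (PySem.List.sorted arr id) (prefixSums (PySem.List.sorted arr id))
            ((PySem.List.sorted arr id).length : Int) (some mid) (mid + 1) high
        else
          loopB budget (PySem.List.sorted arr id) (prefixSums (PySem.List.sorted arr id))
            ((PySem.List.sorted arr id).length : Int) best low (mid - 1))
      rw [← hc]
      by_cases hcc : budCal mid arr ≤ budget
      · rw [if_pos hcc, if_neg (not_lt.mpr hcc), if_pos hcc, if_pos hcc]
        refine ih (high - (mid + 1)).toNat (by omega) (mid + 1) high (answer ++ [mid])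
          (some mid) rfl ?_ ?_
        · exact max?_append_lt answer mid (fun a ha => lt_of_lt_of_le (hinv a ha) hb.1)
        · intro a ha
          rcases List.mem_append.mp ha with h1 | h1
          · have := hinv a h1; omega
          · simp only [List.mem_singleton] at h1; omega
      · have hgt : budCal mid arr > budget := lt_of_not_ge hcc
        rw [if_neg hcc, if_neg hcc, if_pos hgt, if_neg hcc]
        exact ih (mid - 1 - low).toNat (by omega) low (mid - 1) answer best rfl hbest hinv
    · rw [dif_neg hlt, dif_neg hlt]
      exact hbest

theorem ports_eq (budget : Int) (arr : List Int) : solution budget arr = solution_alt budget arr := by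
  show (PySem.List.max? (loopA budget arr [] 0 ((PySem.List.max? arr id).getD 0)) id).getD 0 =
    (loopB budget (PySem.List.sorted arr id) (prefixSums (PySem.List.sorted arr id))
      ((PySem.List.sorted arr id).length : Int) none 0 ((PySem.List.max? arr id).getD 0)).getD 0
  rw [loops_eq budget arr ((((PySem.List.max? arr id).getD 0) - 0).toNat) 0
    ((PySem.List.max? arr id).getD 0) [] none rfl rfl (by simp)]

-- ===== VERDICT (by name: the statement is the Claim_ definition above) =====
theorem solution_spec : Claim_equal_solution := by
  intro budget arr _ _
  unfold Spec_solution
  exact ports_eq budget arr
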